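-- pv_equiv track=rewrite | github.com/ishwaraju/OptionCoder | shared/market/oi_ladder.py | _strongest_strike
-- ===== SOURCE A (Python) =====
-- def _strongest_strike(value_map, positive=True):
--     if not value_map:
--         return None, 0
--     filtered = {
--         strike: value
--         for strike, value in value_map.items()
--         if (value > 0 if positive else value < 0)
--     }
--     if not filtered:
--         return None, 0
--     if positive:
--         strike = max(filtered, key=filtered.get)
--         return strike, filtered[strike]
--     strike = min(filtered, key=filtered.get)
--     return strike, filtered[strike]
-- ===== SOURCE B (Python) =====
-- def _strongest_strike(value_map, positive=True):
--     best_strike, best_value = None, 0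
--     for strike, value in value_map.items():
--         if (value > 0) if positive else (value < 0):
--             if best_strike is None or ((value > best_value) if positive else (value < best_value)):
--                 best_strike, best_value = strike, value
--     return best_strike, best_value
-- ===== Notes on version B (the rewrite author's own statement) =====
-- stated objective: simpler
-- what changed: Replaces A's build-a-filtered-dict-then-max/min(key=get) two-pass with a single loop over value_map.items() tracking the current best (strike, value), using strict comparisons so the first maximal/minimal strike wins exactly like max/min.
import Mathlib
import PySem

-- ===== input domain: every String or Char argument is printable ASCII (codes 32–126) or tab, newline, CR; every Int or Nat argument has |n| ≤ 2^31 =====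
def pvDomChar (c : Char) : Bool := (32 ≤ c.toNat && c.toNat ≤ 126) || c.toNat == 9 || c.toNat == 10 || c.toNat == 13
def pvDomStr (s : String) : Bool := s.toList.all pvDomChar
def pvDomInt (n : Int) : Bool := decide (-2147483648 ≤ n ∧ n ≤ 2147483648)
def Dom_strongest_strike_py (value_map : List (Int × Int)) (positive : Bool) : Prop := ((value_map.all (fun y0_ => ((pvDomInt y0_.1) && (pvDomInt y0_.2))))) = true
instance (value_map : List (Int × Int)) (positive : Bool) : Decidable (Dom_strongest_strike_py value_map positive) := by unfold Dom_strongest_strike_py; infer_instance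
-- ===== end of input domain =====

-- B replaces A's filter-into-a-dict-then-max/min(key=get) with a single pass tracking the best (strike, value); same O(n) cost, simpler.


-- ===== PORT A =====
-- value_map is a Python dict, ported as an association list in insertion order.
-- `max(filtered, key=filtered.get)` / `min(...)` = first extremal key → PySem.List.max?/min? on the pairs;
-- `filtered[strike]` = first-match association-list lookup (List.find?).
def strongest_strike_py (value_map : List (Int × Int)) (positive : Bool) : Option Int × Int :=
  if value_map = [] then (none, 0)
  else
    let filtered := value_map.filter (fun p => if positive then decide (0 < p.2) else decide (p.2 < 0))
    if filtered = [] then (none, 0)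
    else if positive then
      match PySem.List.max? filtered (fun p => p.2) with
      | some p =>
        match filtered.find? (fun q => q.1 == p.1) with
        | some q => (some p.1, q.2)
        | none => (none, 0)   -- unreachable: the chosen strike is a key of filtered
      | none => (none, 0)     -- unreachable: filtered ≠ []
    else
      match PySem.List.min? filtered (fun p => p.2) with
      | some p =>
        match filtered.find? (fun q => q.1 == p.1) with
        | some q => (some p.1, q.2)
        | none => (none, 0)   -- unreachable
      | none => (none, 0)     -- unreachable

-- ===== PORT B =====
def strongest_strike_py_alt (value_map : List (Int × Int)) (positive : Bool) : Option Int × Int :=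
  value_map.foldl (fun (acc : Option Int × Int) (p : Int × Int) =>
    if (if positive then decide (0 < p.2) else decide (p.2 < 0)) then
      match acc.1 with
      | none => (some p.1, p.2)
      | some _ =>
        if (if positive then decide (acc.2 < p.2) else decide (p.2 < acc.2)) then (some p.1, p.2)
        else acc
    else acc) ((none, 0) : Option Int × Int)

-- ===== PRECONDITION & SPEC =====
-- Pre_ excludes association lists with duplicate strikes: a Python dict cannot hold a duplicate key
-- (building one collapses the duplicates), so such lists have no canonical dict reading.
def Pre_strongest_strike_py (value_map : List (Int × Int)) (positive : Bool) : Prop :=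
  (value_map.map Prod.fst).Nodup
instance (value_map : List (Int × Int)) (positive : Bool) : Decidable (Pre_strongest_strike_py value_map positive) := by unfold Pre_strongest_strike_py; infer_instance

def pvWitness_strongest_strike_py : (List (Int × Int)) × Bool := ([(1, 5), (2, -3)], true)

def Spec_strongest_strike_py (value_map : List (Int × Int)) (positive : Bool) (out : Option Int × Int) : Prop := out = strongest_strike_py_alt value_map positive
instance (value_map : List (Int × Int)) (positive : Bool) (out : Option Int × Int) : Decidable (Spec_strongest_strike_py value_map positive out) := by unfold Spec_strongest_strike_py; infer_instance

-- ===== CLAIM (what is proved, stated in full; the proofs are below) =====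
def Claim_equal_strongest_strike_py : Prop := ∀ (value_map : List (Int × Int)) (positive : Bool), Dom_strongest_strike_py value_map positive → Pre_strongest_strike_py value_map positive → Spec_strongest_strike_py value_map positive (strongest_strike_py value_map positive)

-- ===== LEMMAS AND PROOFS =====

-- encode an optional best pair as B's accumulator
def pvEnc : Option (Int × Int) → Option Int × Int
  | none => (none, 0)
  | some p => (some p.1, p.2)

-- B's loop body, specialised to each sign (definitionally the port's lambda at positive = true/false)
def pvStepPos : (Option Int × Int) → (Int × Int) → Option Int × Int := fun acc p =>
  if decide (0 < p.2) then
    match acc.1 with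
    | none => (some p.1, p.2)
    | some _ => if decide (acc.2 < p.2) then (some p.1, p.2) else acc
  else acc

def pvStepNeg : (Option Int × Int) → (Int × Int) → Option Int × Int := fun acc p =>
  if decide (p.2 < 0) then
    match acc.1 with
    | none => (some p.1, p.2)
    | some _ => if decide (p.2 < acc.2) then (some p.1, p.2) else acc
  else acc

theorem pvAltPos (vm : List (Int × Int)) :
    strongest_strike_py_alt vm true = vm.foldl pvStepPos (none, 0) := rfl

theorem pvAltNeg (vm : List (Int × Int)) :
    strongest_strike_py_alt vm false = vm.foldl pvStepNeg (none, 0) := rfl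

-- B's single pass over the raw list = Python max over the filtered pairs (positive case)
theorem pvFoldPos (vm : List (Int × Int)) (pre : List (Int × Int)) :
    vm.foldl pvStepPos (pvEnc (PySem.List.max? pre (fun p => p.2)))
      = pvEnc (PySem.List.max? (pre ++ vm.filter (fun p => decide (0 < p.2))) (fun p => p.2)) := by
  induction vm generalizing pre with
  | nil => simp
  | cons p t ih =>
    by_cases hp : (0 : Int) < p.2
    · have hstep : pvStepPos (pvEnc (PySem.List.max? pre (fun p => p.2))) p
          = pvEnc (PySem.List.max? (pre ++ [p]) (fun p => p.2)) := by
        rcases h : PySem.List.max? pre (fun p => p.2) with _ | m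
        · have : pre = [] := (PySem.List.max?_eq_none_iff _ _).mp h
          subst this
          simp [PySem.List.max?, pvStepPos, pvEnc, hp]
        · simp only [PySem.List.max?] at h ⊢
          by_cases hm : m.2 < p.2
          · simp [List.foldl_append, h, pvStepPos, pvEnc, hp, hm]
          · simp [List.foldl_append, h, pvStepPos, pvEnc, hp, hm]
      rw [List.foldl_cons, hstep, ih (pre ++ [p])]
      simp [hp]
    · have hstep : pvStepPos (pvEnc (PySem.List.max? pre (fun p => p.2))) p
          = pvEnc (PySem.List.max? pre (fun p => p.2)) := by
        rcases PySem.List.max? pre (fun p => p.2) with _ | m <;> simp [pvStepPos, pvEnc, hp]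
      rw [List.foldl_cons, hstep, ih pre]
      simp [hp]

-- same for the negative case (Python min)
theorem pvFoldNeg (vm : List (Int × Int)) (pre : List (Int × Int)) :
    vm.foldl pvStepNeg (pvEnc (PySem.List.min? pre (fun p => p.2)))
      = pvEnc (PySem.List.min? (pre ++ vm.filter (fun p => decide (p.2 < 0))) (fun p => p.2)) := by
  induction vm generalizing pre with
  | nil => simp
  | cons p t ih =>
    by_cases hp : p.2 < (0 : Int)
    · have hstep : pvStepNeg (pvEnc (PySem.List.min? pre (fun p => p.2))) p
          = pvEnc (PySem.List.min? (pre ++ [p]) (fun p => p.2)) := by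
        rcases h : PySem.List.min? pre (fun p => p.2) with _ | m
        · have : pre = [] := (PySem.List.min?_eq_none_iff _ _).mp h
          subst this
          simp [PySem.List.min?, pvStepNeg, pvEnc, hp]
        · simp only [PySem.List.min?] at h ⊢
          by_cases hm : p.2 < m.2
          · simp [List.foldl_append, h, pvStepNeg, pvEnc, hp, hm]
          · simp [List.foldl_append, h, pvStepNeg, pvEnc, hp, hm]
      rw [List.foldl_cons, hstep, ih (pre ++ [p])]
      simp [hp]
    · have hstep : pvStepNeg (pvEnc (PySem.List.min? pre (fun p => p.2))) p
          = pvEnc (PySem.List.min? pre (fun p => p.2)) := by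
        rcases PySem.List.min? pre (fun p => p.2) with _ | m <;> simp [pvStepNeg, pvEnc, hp]
      rw [List.foldl_cons, hstep, ih pre]
      simp [hp]

-- with distinct keys, the association-list lookup of a member's key returns that member
theorem pvFindNodup {l : List (Int × Int)} (h : (l.map Prod.fst).Nodup) {p : Int × Int}
    (hp : p ∈ l) : l.find? (fun q => q.1 == p.1) = some p := by
  induction l with
  | nil => cases hp
  | cons a t ih =>
    rcases List.mem_cons.mp hp with rfl | hpt
    · simp [List.find?]
    · have ha : a.1 ≠ p.1 := by
        intro he
        have : p.1 ∈ t.map Prod.fst := List.mem_map.mpr ⟨p, hpt, rfl⟩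
        rw [← he] at this
        exact (List.nodup_cons.mp h).1 this
      have hb : (a.1 == p.1) = false := by simpa using ha
      have := ih (List.nodup_cons.mp h).2 hpt
      simp [List.find?, hb, this]

-- ===== VERDICT (by name: the statement is the Claim_ definition above) =====
theorem strongest_strike_py_spec : Claim_equal_strongest_strike_py := by
  intro vm positive _hdom hpre
  unfold Spec_strongest_strike_py
  cases positive with
  | true =>
    have hB : strongest_strike_py_alt vm true
        = pvEnc (PySem.List.max? (vm.filter (fun p => decide (0 < p.2))) (fun p => p.2)) := by
      have h := pvFoldPos vm []
      rw [pvAltPos]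
      simpa [PySem.List.max?, pvEnc] using h
    have hnodupf : ((vm.filter (fun p => decide (0 < p.2))).map Prod.fst).Nodup :=
      hpre.sublist (List.Sublist.map Prod.fst List.filter_sublist)
    rw [hB]
    unfold strongest_strike_py
    simp only [if_true]
    by_cases hvm : vm = []
    · subst hvm; rfl
    · simp only [hvm, if_false]
      rcases hmax : PySem.List.max? (vm.filter (fun p => decide (0 < p.2))) (fun p => p.2)
        with _ | p
      · have hf : vm.filter (fun p => decide (0 < p.2)) = [] :=
          (PySem.List.max?_eq_none_iff _ _).mp hmax
        simp [hf, pvEnc, PySem.List.max?]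
      · have hne : vm.filter (fun p => decide (0 < p.2)) ≠ [] := by
          intro h0
          rw [h0] at hmax
          simp [PySem.List.max?] at hmax
        have hfind := pvFindNodup hnodupf (PySem.List.max?_mem hmax)
        simp [hne, hmax, hfind, pvEnc]
  | false =>
    have hB : strongest_strike_py_alt vm false
        = pvEnc (PySem.List.min? (vm.filter (fun p => decide (p.2 < 0))) (fun p => p.2)) := by
      have h := pvFoldNeg vm []
      rw [pvAltNeg]
      simpa [PySem.List.min?, pvEnc] using h
    have hnodupf : ((vm.filter (fun p => decide (p.2 < 0))).map Prod.fst).Nodup :=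
      hpre.sublist (List.Sublist.map Prod.fst List.filter_sublist)
    rw [hB]
    unfold strongest_strike_py
    simp only [show ((false = true) = False) from by simp, if_false]
    by_cases hvm : vm = []
    · subst hvm; rfl
    · simp only [hvm, if_false]
      rcases hmin : PySem.List.min? (vm.filter (fun p => decide (p.2 < 0))) (fun p => p.2)
        with _ | p
      · have hf : vm.filter (fun p => decide (p.2 < 0)) = [] :=
          (PySem.List.min?_eq_none_iff _ _).mp hmin
        simp [hf, pvEnc, PySem.List.min?]
      · have hne : vm.filter (fun p => decide (p.2 < 0)) ≠ [] := by
          intro h0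
          rw [h0] at hmin
          simp [PySem.List.min?] at hmin
        have hfind := pvFindNodup hnodupf (PySem.List.min?_mem hmin)
        simp [hne, hmin, hfind, pvEnc]
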